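-- pv_equiv track=rewrite | github.com/ndxbxrme/wonky-studio | pyscripts/get-ranges.py | indexes_to_ranges
-- ===== SOURCE A (Python) =====
-- def indexes_to_ranges(index_list):
--     ranges = []
--     start = None
--     for i, idx in enumerate(index_list):
--         if start is None:
--             start = idx
--         elif idx - index_list[i-1] != 1:
--             ranges.append([start, index_list[i-1]])
--             start = idx
--     # Add the last range
--     if start is not None:
--         ranges.append([start, index_list[-1]])
--     return ranges
-- ===== SOURCE B (Python) =====
-- def indexes_to_ranges(index_list):
--     # Staged passes: collect the adjacent pairs that break consecutiveness,
--     # then zip the run starts with the run ends; no running state machine.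
--     if not index_list:
--         return []
--     gaps = [(a, b) for a, b in zip(index_list, index_list[1:]) if b - a != 1]
--     starts = [index_list[0]] + [b for _, b in gaps]
--     ends = [a for a, _ in gaps] + [index_list[-1]]
--     return [[s, e] for s, e in zip(starts, ends)]
-- ===== Notes on version B (the rewrite author's own statement) =====
-- stated objective: alternative
-- what changed: Replaces A's single enumerate pass with an Option start / previous-element state machine by staged passes: a comprehension collects the adjacent pairs that break consecutiveness (the gaps), then the run starts (first element plus each gap's right side) are zipped with the run ends (each gap's left side plus the last element).
import Mathlib
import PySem

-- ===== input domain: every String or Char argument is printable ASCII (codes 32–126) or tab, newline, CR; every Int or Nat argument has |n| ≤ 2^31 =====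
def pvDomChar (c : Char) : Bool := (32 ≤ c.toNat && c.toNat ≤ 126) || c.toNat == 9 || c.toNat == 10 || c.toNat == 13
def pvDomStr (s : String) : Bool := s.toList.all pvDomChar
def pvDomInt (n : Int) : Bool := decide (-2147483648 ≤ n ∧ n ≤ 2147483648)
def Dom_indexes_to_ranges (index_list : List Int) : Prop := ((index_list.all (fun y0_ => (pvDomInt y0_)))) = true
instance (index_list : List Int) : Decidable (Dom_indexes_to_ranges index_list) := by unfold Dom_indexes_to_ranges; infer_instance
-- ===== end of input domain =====

-- B replaces A's single-pass Option/previous-element state machine by staged passes: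
-- it first collects the adjacent pairs that break consecutiveness, then zips the
-- run starts with the run ends; same O(n) cost, no running state.

-- ===== PORT A =====
-- Python's index_list[i-1] and index_list[-1] are ported with pyGetD (default 0):
-- both reads occur only at indices that are in range in Python, so this is exact.
def aStep (index_list : List Int) (st : List (List Int) × Option Int) (p : Int × Int) :
    List (List Int) × Option Int :=
  match st.2 with
  | none => (st.1, some p.2)
  | some s =>
    if p.2 - PySem.List.pyGetD index_list (p.1 - 1) 0 ≠ 1 then
      (st.1 ++ [[s, PySem.List.pyGetD index_list (p.1 - 1) 0]], some p.2)
    else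
      (st.1, some s)

-- the trailing 'if start is not None: ranges.append(...)' of A
def aFinish (index_list : List Int) (st : List (List Int) × Option Int) : List (List Int) :=
  match st.2 with
  | none => st.1
  | some s => st.1 ++ [[s, PySem.List.pyGetD index_list (-1) 0]]

def indexes_to_ranges (index_list : List Int) : List (List Int) :=
  aFinish index_list ((PySem.List.enumerate index_list 0).foldl (aStep index_list) ([], none))

-- ===== PORT B =====  (Source B: gaps / starts / ends comprehensions, then zip)
def indexes_to_ranges_alt (index_list : List Int) : List (List Int) :=
  match index_list with
  | [] => []
  | _ :: _ =>
    let gaps := (index_list.zip (PySem.List.slice index_list (some 1) none)).filter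
      (fun p => p.2 - p.1 != 1)
    let starts := PySem.List.pyGetD index_list 0 0 :: gaps.map Prod.snd
    let ends := gaps.map Prod.fst ++ [PySem.List.pyGetD index_list (-1) 0]
    (starts.zip ends).map (fun p => [p.1, p.2])

-- ===== PRECONDITION & SPEC =====
def Spec_indexes_to_ranges (index_list : List Int) (out : List (List Int)) : Prop := out = indexes_to_ranges_alt index_list
instance (index_list : List Int) (out : List (List Int)) : Decidable (Spec_indexes_to_ranges index_list out) := by unfold Spec_indexes_to_ranges; infer_instance

-- ===== CLAIM (what is proved, stated in full; the proofs are below) =====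
def Claim_equal_indexes_to_ranges : Prop := ∀ (index_list : List Int), Dom_indexes_to_ranges index_list → Spec_indexes_to_ranges index_list (indexes_to_ranges index_list)

-- ===== LEMMAS AND PROOFS =====

-- B's output once a run has started: s is the run's start, x its latest element
def bFrom (s x : Int) (cur : List Int) : List (List Int) :=
  let g := ((x :: cur).zip cur).filter (fun p => p.2 - p.1 != 1)
  ((s :: g.map Prod.snd).zip (g.map Prod.fst ++ [cur.getLastD x])).map (fun p => [p.1, p.2])

theorem bFrom_nil (s x : Int) : bFrom s x [] = [[s, x]] := by
  simp [bFrom]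

theorem bFrom_break (s x y : Int) (ys : List Int) (h : y - x ≠ 1) :
    bFrom s x (y :: ys) = [s, x] :: bFrom y y ys := by
  cases ys <;> simp [bFrom, List.zip, h, List.getLast?_cons]

theorem bFrom_cont (s x y : Int) (ys : List Int) (h : y - x = 1) :
    bFrom s x (y :: ys) = bFrom s y ys := by
  cases ys <;> simp [bFrom, List.zip, h, List.getLast?_cons]

theorem alt_cons (x : Int) (xs : List Int) :
    indexes_to_ranges_alt (x :: xs) = bFrom x x xs := by
  simp only [indexes_to_ranges_alt, bFrom, PySem.List.slice_from_one, List.tail_cons,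
    PySem.List.pyGetD_zero_cons, PySem.List.pyGetD_neg_one (x :: xs) 0 (by simp),
    List.getLast_eq_getLastD]

-- the heart: A's fold from a started state, finished with the final append,
-- equals acc ++ B's remaining output
theorem main_fold (cur : List Int) : ∀ (pre : List Int) (x s : Int) (acc : List (List Int)),
    aFinish (pre ++ x :: cur)
      ((PySem.List.enumerate cur ((pre.length : Int) + 1)).foldl
        (aStep (pre ++ x :: cur)) (acc, some s))
    = acc ++ bFrom s x cur := by
  induction cur with
  | nil =>
    intro pre x s acc
    have h : pre ++ x :: ([] : List Int) = (pre ++ []) ++ [x] := by simp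
    simp only [PySem.List.enumerate_nil, List.foldl_nil, aFinish, h,
      PySem.List.pyGetD_neg_one_append_singleton, bFrom_nil]
  | cons y ys ih =>
    intro pre x s acc
    have hget : PySem.List.pyGetD (pre ++ x :: y :: ys) (((pre.length : Int) + 1) - 1) 0 = x := by
      have : ((pre.length : Int) + 1) - 1 = ((pre.length : Nat) : Int) := by ring
      rw [this, PySem.List.pyGetD_natCast]
      simp [List.getD]
    have hfull : pre ++ x :: y :: ys = (pre ++ [x]) ++ y :: ys := by simp
    have hoff : ((pre.length : Int) + 1) + 1 = (((pre ++ [x]).length : Nat) : Int) + 1 := by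
      simp
    simp only [PySem.List.enumerate_cons, List.foldl_cons, aStep, hget]
    by_cases hc : y - x ≠ 1
    · rw [if_pos hc, hoff, hfull]
      rw [ih (pre ++ [x]) y y (acc ++ [[s, x]])]
      simp [bFrom_break s x y ys hc, List.append_assoc]
    · rw [if_neg hc, hoff, hfull]
      rw [ih (pre ++ [x]) y s acc]
      rw [bFrom_cont s x y ys (by omega)]

-- ===== VERDICT (by name: the statement is the Claim_ definition above) =====
theorem indexes_to_ranges_spec : Claim_equal_indexes_to_ranges := by
  intro index_list _
  unfold Spec_indexes_to_ranges indexes_to_ranges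
  cases index_list with
  | nil => simp [aFinish, indexes_to_ranges_alt]
  | cons x xs =>
    simp only [PySem.List.enumerate_cons, List.foldl_cons, aStep]
    have h0 : (0 : Int) + 1 = (((([] : List Int)).length : Nat) : Int) + 1 := by simp
    have h := main_fold xs [] x x []
    simp only [List.nil_append] at h
    rw [h0, h, alt_cons]
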